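-- pv_equiv track=rewrite | github.com/meirdev/adventofcode-2018 | day2/main.py | part1
-- ===== SOURCE A (Python) =====
-- import collections
--
-- def parse_input(input: str) -> list[str]:
--     return input.strip().splitlines()
--
-- def part1(input: str) -> int:
--     strings = parse_input(input)
--
--     letters = {2: 0, 3: 0}
--
--     for string in strings:
--         counter = list(collections.Counter(string).values())
--
--         for letter in letters:
--             letters[letter] += letter in counter
--
--     return letters[2] * letters[3]
-- ===== SOURCE B (Python) =====
-- def part1(input: str) -> int:
--     twos = 0
--     threes = 0
--     for line in input.strip().splitlines():
--         # sort the characters; equal letters become contiguous runs,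
--         # then a single scan measures run lengths
--         has2 = False
--         has3 = False
--         cur = None
--         run = 0
--         for ch in sorted(line):
--             if ch == cur:
--                 run += 1
--             else:
--                 if run == 2:
--                     has2 = True
--                 if run == 3:
--                     has3 = True
--                 cur = ch
--                 run = 1
--         if run == 2:
--             has2 = True
--         if run == 3:
--             has3 = True
--         twos += has2
--         threes += has3
--     return twos * threes
-- ===== Notes on version B (the rewrite author's own statement) =====
-- stated objective: alternative
-- what changed: B derives each line's letter frequencies by sorting the line's characters and scanning run lengths in one pass (flagging a run of length 2/3), instead of building a Counter hash table per line and tallying membership of 2/3 in its values via a {2,3}-keyed dict.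
import Mathlib
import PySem

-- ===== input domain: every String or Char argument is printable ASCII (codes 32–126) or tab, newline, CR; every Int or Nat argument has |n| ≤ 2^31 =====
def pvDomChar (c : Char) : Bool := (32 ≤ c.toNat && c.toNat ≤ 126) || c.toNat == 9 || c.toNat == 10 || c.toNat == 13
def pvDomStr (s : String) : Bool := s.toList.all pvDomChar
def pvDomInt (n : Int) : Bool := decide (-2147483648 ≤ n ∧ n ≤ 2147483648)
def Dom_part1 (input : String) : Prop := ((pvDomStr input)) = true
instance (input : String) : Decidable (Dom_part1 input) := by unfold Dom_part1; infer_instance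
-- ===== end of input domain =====

-- B computes each line's letter frequencies by sorting the line and scanning run lengths in
-- one pass, instead of a per-line Counter hash table plus a {2,3}-keyed tally dict (alternative
-- algorithm; no speed claim).

-- ===== PORT A =====
def part1 (input : String) : Int :=
  let strings := PySem.Str.splitlines (PySem.Str.strip input)
  let letters : PySem.Dict Int Int := (PySem.Dict.empty.insert 2 0).insert 3 0
  let letters := strings.foldl (fun d string =>
    let counter := (PySem.Dict.counter string.toList).values
    d.keys.foldl (fun d2 letter =>
      d2.modify letter 0 (fun v => v + (if counter.contains letter then 1 else 0))) d) letters
  (letters.getD 2 0) * (letters.getD 3 0)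

-- ===== PORT B =====
-- one character of the run-length scan: same-as-current extends the run, otherwise the
-- finished run is flushed into the 2/3 flags and a new run starts
def bstep (st : Bool × Bool × Option Char × Int) (ch : Char) : Bool × Bool × Option Char × Int :=
  if some ch == st.2.2.1 then (st.1, st.2.1, st.2.2.1, st.2.2.2 + 1)
  else ((st.1 || st.2.2.2 == 2), (st.2.1 || st.2.2.2 == 3), some ch, 1)

def part1_alt (input : String) : Int :=
  let lines := PySem.Str.splitlines (PySem.Str.strip input)
  let p := lines.foldl (fun (p : Int × Int) line =>
    let st := (PySem.List.sorted line.toList (fun c => c) false).foldl bstep (false, false, none, 0)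
    let has2 := st.1 || st.2.2.2 == 2
    let has3 := st.2.1 || st.2.2.2 == 3
    ((p.1 + if has2 then 1 else 0), (p.2 + if has3 then 1 else 0))) ((0 : Int), (0 : Int))
  p.1 * p.2

-- ===== PRECONDITION & SPEC =====
def Spec_part1 (input : String) (out : Int) : Prop := out = part1_alt input
instance (input : String) (out : Int) : Decidable (Spec_part1 input out) := by unfold Spec_part1; infer_instance

-- ===== CLAIM (what is proved, stated in full; the proofs are below) =====
def Claim_equal_part1 : Prop := ∀ (input : String), Dom_part1 input → Spec_part1 input (part1 input)

-- ===== LEMMAS AND PROOFS =====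

-- per-line A: "n ∈ Counter(line).values()" ↔ "some distinct character of line occurs exactly n times"
theorem counter_values_contains (chars : List Char) (n : Nat) :
    ((PySem.Dict.counter chars).values.contains (n : Int))
      = (PySem.Set.ofList chars).any (fun c => chars.count c == n) := by
  have hv : (PySem.Dict.counter chars).values
      = (PySem.Set.ofList chars).map (fun k => (chars.count k : Int)) := by
    have := PySem.Dict.items_counter (xs := chars)
    simp only [PySem.Dict.values, this, List.map_map]
    rfl
  rw [hv, Bool.eq_iff_iff]
  simp only [List.contains_iff_mem, List.mem_map, List.any_eq_true, beq_iff_eq]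
  constructor
  · rintro ⟨c, hc, hcn⟩; exact ⟨c, hc, by exact_mod_cast hcn⟩
  · rintro ⟨c, hc, hcn⟩; exact ⟨c, hc, by exact_mod_cast hcn⟩

-- one step of A's loop on the concrete two-key dict
theorem stepA_eq (a b : Int) (string : String) :
    ((PySem.Dict.mk [((2:Int),a),(3,b)]).keys.foldl (fun d2 letter =>
        d2.modify letter 0 (fun v => v +
          (if ((PySem.Dict.counter string.toList).values.contains letter) then 1 else 0)))
      (PySem.Dict.mk [((2:Int),a),(3,b)]))
    = PySem.Dict.mk
        [((2:Int), a + (if (PySem.Set.ofList string.toList).any (fun c => string.toList.count c == 2) then 1 else 0)),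
         (3, b + (if (PySem.Set.ofList string.toList).any (fun c => string.toList.count c == 3) then 1 else 0))] := by
  show PySem.Dict.mk
      [((2:Int), a + (if ((PySem.Dict.counter string.toList).values.contains 2) then 1 else 0)),
       (3, b + (if ((PySem.Dict.counter string.toList).values.contains 3) then 1 else 0))] = _
  rw [show ((2:Int)) = ((2:Nat) : Int) from rfl, show ((3:Int)) = ((3:Nat) : Int) from rfl,
      counter_values_contains, counter_values_contains]

theorem bstep_replicate (k : Nat) (c : Char) (h2 h3 : Bool) (run : Int) :
    (List.replicate k c).foldl bstep (h2, h3, some c, run) = (h2, h3, some c, run + k) := by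
  induction k generalizing run with
  | zero => simp
  | succ k ih =>
      rw [List.replicate_succ, List.foldl_cons]
      show (List.replicate k c).foldl bstep (bstep (h2, h3, some c, run) c) = _
      rw [show bstep (h2, h3, some c, run) c = (h2, h3, some c, run + 1) by simp [bstep]]
      rw [ih]; simp; omega

theorem run_scan (s : List Char) (hs : s.Pairwise (· ≤ ·)) (h2 h3 : Bool)
    (cur : Option Char) (run : Int) (hcur : ∀ d ∈ s, cur ≠ some d) :
    (let st := s.foldl bstep (h2, h3, cur, run)
     (((st.1 || st.2.2.2 == 2) : Bool), ((st.2.1 || st.2.2.2 == 3) : Bool)))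
    = ((h2 || run == 2 || s.any (fun c => s.count c == 2)),
       (h3 || run == 3 || s.any (fun c => s.count c == 3))) := by
  obtain ⟨L, hL⟩ : ∃ L, s.length ≤ L := ⟨s.length, le_refl _⟩
  induction L generalizing s h2 h3 cur run with
  | zero =>
      have : s = [] := List.eq_nil_of_length_eq_zero (Nat.le_zero.mp hL)
      subst this; simp
  | succ L ih =>
      cases s with
      | nil => simp
      | cons c t =>
          have hle : ∀ d ∈ t, c ≤ d := fun d hd => (List.pairwise_cons.mp hs).1 d hd
          have ht : t.Pairwise (· ≤ ·) := (List.pairwise_cons.mp hs).2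
          set t1 := t.takeWhile (fun x => x == c) with ht1
          set t2 := t.dropWhile (fun x => x == c) with ht2
          set k := t1.length with hk
          have hrep : t1 = List.replicate k c := by
            rw [hk, List.eq_replicate_length]
            intro b hb
            have hb' : (b == c) = true :=
              List.mem_takeWhile_imp (p := fun x => x == c) (l := t) (by rw [ht1] at hb; exact hb)
            exact eq_of_beq hb'
          have hsplit : t = List.replicate k c ++ t2 := by
            rw [← hrep, ht1, ht2, List.takeWhile_append_dropWhile]
          have ht2sub : List.Sublist t2 t := List.dropWhile_sublist _
          have ht2p : t2.Pairwise (· ≤ ·) := ht.sublist ht2sub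
          have hgt : ∀ d ∈ t2, c < d := by
            cases h : t2 with
            | nil => simp [h]
            | cons d0 r =>
                have hd0ne : (d0 == c) = false := by
                  have := List.head_dropWhile_not (fun x => x == c) (l := t)
                    (by rw [← ht2, h]; simp)
                  simpa [← ht2, h] using this
                have hd0mem : d0 ∈ t := ht2sub.mem (by simp [h])
                have hd0 : c < d0 :=
                  lt_of_le_of_ne (hle d0 hd0mem) (fun hcd => by simp [← hcd] at hd0ne)
                intro d hd
                rcases List.mem_cons.mp hd with rfl | hdr
                · exact hd0
                · have : d0 ≤ d := by
                    rw [h] at ht2p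
                    exact (List.pairwise_cons.mp ht2p).1 d hdr
                  exact lt_of_lt_of_le hd0 this
          have hcnot : c ∉ t2 := fun hmem => lt_irrefl c (hgt c hmem)
          have hlen2 : t2.length ≤ L := le_trans (ht2sub.length_le)
            (by simpa using Nat.le_of_succ_le_succ hL)
          -- counts in c :: t
          have hcount_c : (c :: t).count c = k + 1 := by
            rw [hsplit]
            simp [List.count_cons, List.count_append, List.count_replicate,
                  List.count_eq_zero.mpr hcnot]
          have hcount_d : ∀ d ∈ t2, (c :: t).count d = t2.count d := by
            intro d hd
            have hdc : d ≠ c := fun h => by subst h; exact hcnot hd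
            rw [hsplit]
            simp [List.count_cons, List.count_append, List.count_replicate, hdc,
                  Ne.symm hdc, (beq_eq_false_iff_ne).mpr hdc]
          have hany : ∀ n : Nat, ((c :: t).any (fun x => (c :: t).count x == n))
              = ((k + 1 == n) || t2.any (fun x => t2.count x == n)) := by
            intro n
            rw [Bool.eq_iff_iff]
            simp only [List.any_eq_true, Bool.or_eq_true, beq_iff_eq]
            constructor
            · rintro ⟨x, hx, hxn⟩
              rcases List.mem_cons.mp hx with rfl | hxt
              · left; rw [← hcount_c]; exact hxn
              · rw [hsplit] at hxt
                rcases List.mem_append.mp hxt with hx1 | hx2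
                · left
                  have : x = c := List.eq_of_mem_replicate hx1
                  subst this; rw [← hcount_c]; exact hxn
                · right; exact ⟨x, hx2, by rw [← hcount_d x hx2]; exact hxn⟩
            · rintro (hn | ⟨x, hx, hxn⟩)
              · exact ⟨c, List.mem_cons_self, by rw [hcount_c]; exact hn⟩
              · refine ⟨x, ?_, by rw [hcount_d x hx]; exact hxn⟩
                exact List.mem_cons_of_mem _ (hsplit ▸ List.mem_append_right _ hx)
          -- the fold
          have hnec : (some c == cur) = false := by
            rcases cur with _ | e
            · rfl
            · exact (beq_eq_false_iff_ne).mpr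
                (fun h => (hcur c List.mem_cons_self) (by simp at h; simp [h]))
          have hfold1 : bstep (h2, h3, cur, run) c
              = ((h2 || run == 2), (h3 || run == 3), some c, 1) := by
            simp [bstep, hnec]
          have hcur2 : ∀ d ∈ t2, (some c : Option Char) ≠ some d := by
            intro d hd h
            have hcd : c = d := by simpa using h
            exact hcnot (by rw [hcd]; exact hd)
          have := ih t2 ht2p (h2 || run == 2) (h3 || run == 3) (some c) (1 + k) hcur2 hlen2
          simp only [List.foldl_cons, hfold1, hsplit, List.foldl_append,
            bstep_replicate] at *
          rw [this]
          have hbeq : ∀ n : Nat, (((1 : Int) + k) == (n : Int)) = ((k + 1 : Nat) == n) := by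
            intro n
            rw [Bool.eq_iff_iff, beq_iff_eq, beq_iff_eq]
            omega
          rw [show ((2:Int)) = ((2:Nat):Int) from rfl, show ((3:Int)) = ((3:Nat):Int) from rfl,
              hbeq 2, hbeq 3, hany 2, hany 3]
          simp [Bool.or_assoc]

-- per line: B's sorted run-length scan agrees with A's Counter-values membership test
theorem flags_eq (line : List Char) :
    (let st := (PySem.List.sorted line (fun c => c) false).foldl bstep (false, false, none, 0)
     (((st.1 || st.2.2.2 == 2) : Bool), ((st.2.1 || st.2.2.2 == 3) : Bool)))
    = ((PySem.Set.ofList line).any (fun c => line.count c == 2),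
       (PySem.Set.ofList line).any (fun c => line.count c == 3)) := by
  have hs : (PySem.List.sorted line (fun c => c) false).Pairwise (· ≤ ·) := by
    have := PySem.List.sorted_pairwise (xs := line) (key := fun c => c)
    simpa using this
  rw [run_scan _ hs false false none 0 (by intro d _ h; cases h)]
  have hperm : (PySem.List.sorted line (fun c => c) false).Perm line :=
    PySem.List.sorted_perm _ _ _
  have hany : ∀ n : Nat, ((PySem.List.sorted line (fun c => c) false).any
        (fun c => (PySem.List.sorted line (fun c => c) false).count c == n))
      = (PySem.Set.ofList line).any (fun c => line.count c == n) := by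
    intro n
    rw [Bool.eq_iff_iff]
    simp only [List.any_eq_true, beq_iff_eq]
    constructor
    · rintro ⟨c, hc, hcn⟩
      exact ⟨c, (PySem.Set.mem_ofList _ _).mpr (hperm.mem_iff.mp hc),
        by rw [← hperm.count_eq]; exact hcn⟩
    · rintro ⟨c, hc, hcn⟩
      exact ⟨c, hperm.mem_iff.mpr ((PySem.Set.mem_ofList _ _).mp hc),
        by rw [hperm.count_eq]; exact hcn⟩
  rw [hany 2, hany 3]
  simp

-- A's whole loop versus B's whole loop, simultaneously, by induction on the lines
theorem loop_eq (lines : List String) (a b : Int) :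
    (lines.foldl (fun d string =>
        let counter := (PySem.Dict.counter string.toList).values
        d.keys.foldl (fun d2 letter =>
          d2.modify letter 0 (fun v => v + (if counter.contains letter then 1 else 0))) d)
      (PySem.Dict.mk [((2:Int),a),(3,b)]))
    = (fun (p : Int × Int) => PySem.Dict.mk [((2:Int), p.1), (3, p.2)])
        (lines.foldl (fun (p : Int × Int) line =>
          let st := (PySem.List.sorted line.toList (fun c => c) false).foldl bstep (false, false, none, 0)
          let has2 := st.1 || st.2.2.2 == 2
          let has3 := st.2.1 || st.2.2.2 == 3
          ((p.1 + if has2 then 1 else 0), (p.2 + if has3 then 1 else 0))) (a, b)) := by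
  induction lines generalizing a b with
  | nil => rfl
  | cons l ls ih =>
      simp only [List.foldl_cons]
      rw [stepA_eq a b l]
      have hf := flags_eq l.toList
      simp only at hf
      rw [Prod.mk.injEq] at hf
      rw [ih]
      simp only [← hf.1, ← hf.2]

-- ===== VERDICT (by name: the statement is the Claim_ definition above) =====
theorem part1_spec : Claim_equal_part1 := by
  intro input _
  show part1 input = part1_alt input
  simp only [part1, part1_alt]
  rw [show ((PySem.Dict.empty.insert (2:Int) (0:Int)).insert 3 0)
        = PySem.Dict.mk [((2:Int),(0:Int)),(3,0)] from rfl]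
  rw [loop_eq]
  beta_reduce
  rw [show ∀ (x y : Int), (PySem.Dict.mk [((2:Int),x),(3,y)]).getD 2 0 = x from fun _ _ => rfl,
      show ∀ (x y : Int), (PySem.Dict.mk [((2:Int),x),(3,y)]).getD 3 0 = y from fun _ _ => rfl]
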